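-- pv_equiv track=rewrite | github.com/lancelot291/algorithms-level-5 | 108_triangle-snail.py | solution
-- ===== SOURCE A (Python) =====
-- def solution(n):
--     '''returns a snail patterned 2D array'''
--     arr = [[0]*n for _ in range(n)]
--     # initialize the 2D array
--     num_list = []
--     # the final answer
--     num = 1
--     # the nunmbet we are going to put in the array as we go through the snail pattern
--     pattern = [(1, 0), (0, 1), (-1, -1)]
--     # the pattern of moves
--     x, y = -1, 0
--     # the starting point
--     for i in range(n):
--         for _ in range(i, n):
--         # the number of times we are going to move in the same direction
--         # is n-1, n-1, n-2, n-2, n-3, n-3, ...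
--             x += pattern[i%3][0]
--             y += pattern[i%3][1]
--             # follow the pattern in cycle of 3
--             arr[x][y] = num
--             num += 1
--             # put the number in the array and increment the number
--
--     for i in range(n):
--         for j in range(n):
--             if arr[i][j] != 0:
--                 num_list.append(arr[i][j])
--                 # put the number in the final answer if it is not 0
--     return num_list
-- ===== SOURCE B (Python) =====
-- def _cell(n, i, j):
--     """closed-form value at triangle cell (i, j), 0 <= j <= i < n"""
--     r = min(j, n - 1 - i, i - j)        # which spiral ring the cell lies on
--     m = n - 3 * r                       # side length of that ring's triangle
--     s = 3 * r * n - 3 * r - (9 * r * (r - 1)) // 2   # numbers used by outer rings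
--     a = i - 2 * r
--     b = j - r
--     if b == 0:
--         return s + a + 1                # left edge of the ring, going down
--     elif a == m - 1:
--         return s + m + b                # bottom edge, going right
--     else:
--         return s + 3 * m - 2 - a        # diagonal edge, going up
--
--
-- def solution(n):
--     '''returns the snail-pattern numbers row by row, by closed formula (no grid)'''
--     out = []
--     for i in range(n):
--         for j in range(i + 1):
--             out.append(_cell(n, i, j))
--     return out
-- ===== Notes on version B (the rewrite author's own statement) =====
-- stated objective: alternative
-- what changed: Replaces the grid-filling spiral walk (simulate the three-direction snail into an n x n array, then scan for nonzeros) with a direct closed-form computation: for each triangle cell (i,j) the ring index r = min(j, n-1-i, i-j) determines its value arithmetically, so no grid and no simulation are built.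
import Mathlib
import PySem

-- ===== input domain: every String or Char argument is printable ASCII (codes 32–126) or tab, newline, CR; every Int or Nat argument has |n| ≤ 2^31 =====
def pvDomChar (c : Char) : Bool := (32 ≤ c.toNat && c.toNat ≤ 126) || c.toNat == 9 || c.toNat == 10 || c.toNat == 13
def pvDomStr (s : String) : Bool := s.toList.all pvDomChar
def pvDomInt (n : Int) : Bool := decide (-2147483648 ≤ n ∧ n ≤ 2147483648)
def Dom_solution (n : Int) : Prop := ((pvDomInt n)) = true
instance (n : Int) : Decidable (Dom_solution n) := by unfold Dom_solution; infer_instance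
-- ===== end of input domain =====

-- B replaces A's grid-filling spiral simulation by a per-cell closed formula (ring index
-- r = min(j, n-1-i, i-j)); an alternative decomposition of the same asymptotic cost, no grid built.

-- ===== PORT A =====
-- Literal transliteration of A: build an n×n zero grid, walk the snail with the cyclic
-- direction pattern [(1,0),(0,1),(-1,-1)], then scan the grid row-major collecting nonzeros.
-- arr[x][y] = num is ported with pySetD/pyGetD (Python index semantics; every index the walk
-- produces is in range, so A raises nowhere and the total forms are exact).
def solution (n : Int) : List Int :=
  let arr : List (List Int) := (PySem.List.pyRange 0 n).map (fun _ => PySem.List.pyRepeat [(0 : Int)] n)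
  let pattern : List (Int × Int) := [(1, 0), (0, 1), (-1, -1)]
  let st :=
    (PySem.List.pyRange 0 n).foldl
      (fun (s : List (List Int) × Int × Int × Int) i =>
        (PySem.List.pyRange i n).foldl
          (fun s _ =>
            let d := PySem.List.pyGetD pattern (PySem.Int.mod i 3) (0, 0)
            let x := s.2.2.1 + d.1
            let y := s.2.2.2 + d.2
            (PySem.List.pySetD s.1 x (PySem.List.pySetD (PySem.List.pyGetD s.1 x []) y s.2.1),
              s.2.1 + 1, x, y))
          s)
      (arr, 1, -1, 0)
  (PySem.List.pyRange 0 n).foldl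
    (fun acc i =>
      (PySem.List.pyRange 0 n).foldl
        (fun acc j =>
          if PySem.List.pyGetD (PySem.List.pyGetD st.1 i []) j 0 ≠ 0 then
            acc ++ [PySem.List.pyGetD (PySem.List.pyGetD st.1 i []) j 0]
          else acc)
        acc)
    []

-- ===== PORT B =====
-- helper of B: closed-form value of triangle cell (i, j), 0 ≤ j ≤ i < n
def cell (n i j : Int) : Int :=
  let r := min j (min (n - 1 - i) (i - j))
  let m := n - 3 * r
  let s := 3 * r * n - 3 * r - PySem.Int.floordiv (9 * r * (r - 1)) 2
  let a := i - 2 * r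
  let b := j - r
  if b = 0 then s + a + 1
  else if a = m - 1 then s + m + b
  else s + 3 * m - 2 - a

def solution_alt (n : Int) : List Int :=
  (PySem.List.pyRange 0 n).foldl
    (fun acc i =>
      (PySem.List.pyRange 0 (i + 1)).foldl (fun acc j => acc ++ [cell n i j]) acc)
    []

-- ===== PRECONDITION & SPEC =====
def Spec_solution (n : Int) (out : List Int) : Prop := out = solution_alt n
instance (n : Int) (out : List Int) : Decidable (Spec_solution n out) := by unfold Spec_solution; infer_instance

-- ===== CLAIM (what is proved, stated in full; the proofs are below) =====
def Claim_equal_solution : Prop := ∀ (n : Int), Dom_solution n → Spec_solution n (solution n)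

-- ===== LEMMAS AND PROOFS =====

def runWrites (x y dx dy num : Int) : Nat → List ((Int × Int) × Int)
  | 0 => []
  | Nat.succ k => ((x + dx, y + dy), num) :: runWrites (x + dx) (y + dy) dx dy (num + 1) k

theorem mem_runWrites {x y dx dy num : Int} {k : Nat} {w : (Int × Int) × Int} :
    w ∈ runWrites x y dx dy num k ↔
      ∃ t : Nat, t < k ∧ w = ((x + ((t : Int) + 1) * dx, y + ((t : Int) + 1) * dy), num + t) := by
  induction k generalizing x y num with
  | zero => simp [runWrites]
  | succ k ih =>
    simp only [runWrites, List.mem_cons, ih]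
    constructor
    · rintro (rfl | ⟨t, ht, rfl⟩)
      · exact ⟨0, by omega, by norm_num⟩
      · refine ⟨t + 1, by omega, ?_⟩
        push_cast
        norm_num [Prod.mk.injEq]
        refine ⟨⟨by ring, by ring⟩, by ring⟩
    · rintro ⟨t, ht, rfl⟩
      cases t with
      | zero => left; norm_num
      | succ t =>
        right
        refine ⟨t, by omega, ?_⟩
        push_cast
        norm_num [Prod.mk.injEq]
        refine ⟨⟨by ring, by ring⟩, by ring⟩
def writeCell (g : List (List Int)) (p : Int × Int) (v : Int) : List (List Int) :=
  PySem.List.pySetD g p.1 (PySem.List.pySetD (PySem.List.pyGetD g p.1 []) p.2 v)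

def applyWrites (g : List (List Int)) (ws : List ((Int × Int) × Int)) : List (List Int) :=
  ws.foldl (fun g w => writeCell g w.1 w.2) g

def dirA (i : Nat) : Int × Int :=
  PySem.List.pyGetD [((1 : Int), (0 : Int)), (0, 1), (-1, -1)] (PySem.Int.mod (i : Int) 3) (0, 0)

def stA (n : Int) : Nat → (List ((Int × Int) × Int)) × Int × Int × Int
  | 0 => ([], 1, -1, 0)
  | Nat.succ i =>
    let s := stA n i
    let d := dirA i
    let k := (n - (i : Int)).toNat
    (s.1 ++ runWrites s.2.2.1 s.2.2.2 d.1 d.2 s.2.1 k,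
      s.2.1 + (k : Int), s.2.2.1 + (k : Int) * d.1, s.2.2.2 + (k : Int) * d.2)

def arr0 (n : Int) : List (List Int) :=
  (PySem.List.pyRange 0 n).map (fun _ => PySem.List.pyRepeat [(0 : Int)] n)

theorem step_iterate (d : Int × Int) (k : Nat) (g : List (List Int)) (num x y : Int) :
    (fun (s : List (List Int) × Int × Int × Int) =>
        (PySem.List.pySetD s.1 (s.2.2.1 + d.1)
            (PySem.List.pySetD (PySem.List.pyGetD s.1 (s.2.2.1 + d.1) []) (s.2.2.2 + d.2) s.2.1),
          s.2.1 + 1, s.2.2.1 + d.1, s.2.2.2 + d.2))^[k] (g, num, x, y)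
      = (applyWrites g (runWrites x y d.1 d.2 num k), num + (k : Int), x + (k : Int) * d.1,
          y + (k : Int) * d.2) := by
  induction k generalizing g num x y with
  | zero => simp [applyWrites, runWrites]
  | succ k ih =>
    rw [Function.iterate_succ_apply, ih]
    simp only [runWrites, applyWrites, List.foldl_cons, writeCell]
    refine congrArg₂ _ rfl ?_
    simp only [Prod.mk.injEq]
    push_cast
    refine ⟨by ring, by ring, by ring⟩

theorem outer_fold (n : Int) (j : Nat) (hj : (j : Int) ≤ n) :
    (PySem.List.pyRange 0 (j : Int)).foldl
      (fun (s : List (List Int) × Int × Int × Int) i =>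
        (PySem.List.pyRange i n).foldl
          (fun s _ =>
            let d := PySem.List.pyGetD [((1 : Int), (0 : Int)), (0, 1), (-1, -1)] (PySem.Int.mod i 3) (0, 0)
            let x := s.2.2.1 + d.1
            let y := s.2.2.2 + d.2
            (PySem.List.pySetD s.1 x (PySem.List.pySetD (PySem.List.pyGetD s.1 x []) y s.2.1),
              s.2.1 + 1, x, y))
          s)
      (arr0 n, 1, -1, 0)
      = (applyWrites (arr0 n) (stA n j).1, (stA n j).2) := by
  induction j with
  | zero =>
    simp [PySem.List.pyRange_one_eq_nil, stA, applyWrites]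
  | succ j ih =>
    have hj' : (j : Int) ≤ n := by push_cast at hj ⊢; omega
    rw [show ((j + 1 : Nat) : Int) = (j : Int) + 1 by push_cast; ring,
      PySem.List.pyRange_one_succ_right (by positivity), List.foldl_append, ih hj']
    simp only [List.foldl_cons, List.foldl_nil]
    have hd : PySem.List.pyGetD [((1 : Int), (0 : Int)), (0, 1), (-1, -1)] (PySem.Int.mod (j : Int) 3) (0, 0) = dirA j := rfl
    rw [hd]
    rw [List.foldl_const
      (f := fun (s : List (List Int) × Int × Int × Int) =>
        (PySem.List.pySetD s.1 (s.2.2.1 + (dirA j).1)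
            (PySem.List.pySetD (PySem.List.pyGetD s.1 (s.2.2.1 + (dirA j).1) []) (s.2.2.2 + (dirA j).2) s.2.1),
          s.2.1 + 1, s.2.2.1 + (dirA j).1, s.2.2.2 + (dirA j).2))]
    rw [step_iterate]
    rw [PySem.List.length_pyRange_one]
    simp only [stA, applyWrites, List.foldl_append]
def sVal (n r : Int) : Int := 3 * r * n - 3 * r - (9 * r * (r - 1)) / 2

def expSt (n : Int) (i : Nat) : Int × Int × Int :=
  let r : Int := ((i / 3 : Nat) : Int)
  let m := n - 3 * r
  if i % 3 = 0 then (sVal n r + 1, 2 * r - 1, r)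
  else if i % 3 = 1 then (sVal n r + 1 + m, n - 1 - r, r)
  else (sVal n r + 1 + m + (m - 1), n - 1 - r, n - 2 * r - 1)

theorem even_pred_self (r : Int) : 2 ∣ r * (r - 1) := by
  rcases Int.even_or_odd r with ⟨c, hc⟩ | ⟨c, hc⟩
  · exact ⟨c * (r - 1), by rw [hc]; ring⟩
  · exact ⟨r * c, by rw [hc]; ring⟩

theorem sVal_succ (n r : Int) : sVal n (r + 1) = sVal n r + 3 * n - 3 - 9 * r := by
  unfold sVal
  obtain ⟨c, hc⟩ := even_pred_self r
  have e1 : 9 * (r + 1) * (r + 1 - 1) = 2 * (9 * c + 9 * r) := by linear_combination 9 * hc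
  have e2 : 9 * r * (r - 1) = 2 * (9 * c) := by linear_combination 9 * hc
  rw [e1, e2, Int.mul_ediv_cancel_left _ (by norm_num), Int.mul_ediv_cancel_left _ (by norm_num)]
  ring

theorem dirA_eq (i : Nat) :
    dirA i = if i % 3 = 0 then ((1 : Int), (0 : Int)) else if i % 3 = 1 then (0, 1) else (-1, -1) := by
  have h3 : i % 3 = 0 ∨ i % 3 = 1 ∨ i % 3 = 2 := by omega
  unfold dirA
  rw [show PySem.Int.mod (i : Int) 3 = ((i % 3 : Nat) : Int) from PySem.Int.mod_natCast i 3]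
  rcases h3 with h | h | h <;> simp [h] <;> decide

theorem lap_inv (n : Int) (i : Nat) (hi : (i : Int) ≤ n) : (stA n i).2 = expSt n i := by
  induction i with
  | zero => simp [stA, expSt, sVal]
  | succ i ih =>
    have hi' : (i : Int) ≤ n := by push_cast at hi ⊢; omega
    have hk : (((n - (i : Int)).toNat : Int)) = n - i := by
      rw [Int.toNat_of_nonneg (by omega)]
    have h3 : i % 3 = 0 ∨ i % 3 = 1 ∨ i % 3 = 2 := by omega
    simp only [stA, ih hi']
    rcases h3 with h | h | h
    · have hd : dirA i = (1, 0) := by rw [dirA_eq, h]; rfl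
      have h1 : (i + 1) % 3 = 1 := by omega
      have h2 : (i + 1) / 3 = i / 3 := by omega
      simp only [expSt, hd, h, h1, h2, hk]
      set R := ((i / 3 : Nat) : Int) with hR
      have hie : (i : Int) = 3 * R := by rw [hR]; push_cast; omega
      have hq : (i : Int) / 3 = R := by rw [hR]; omega
      norm_num [Prod.mk.injEq]
      exact ⟨by linarith, by linarith⟩
    · have hd : dirA i = (0, 1) := by rw [dirA_eq, h]; rfl
      have h1 : (i + 1) % 3 = 2 := by omega
      have h2 : (i + 1) / 3 = i / 3 := by omega
      simp only [expSt, hd, h, h1, h2, hk]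
      set R := ((i / 3 : Nat) : Int) with hR
      have hie : (i : Int) = 3 * R + 1 := by rw [hR]; push_cast; omega
      have hq : (i : Int) / 3 = R := by rw [hR]; omega
      norm_num [Prod.mk.injEq]
      exact ⟨by linarith, by linarith⟩
    · have hd : dirA i = (-1, -1) := by rw [dirA_eq, h]; rfl
      have h1 : (i + 1) % 3 = 0 := by omega
      have h2 : ((i + 1) / 3 : Nat) = i / 3 + 1 := by omega
      simp only [expSt, hd, h, h1, h2, hk]
      set R := ((i / 3 : Nat) : Int) with hR
      have hie : (i : Int) = 3 * R + 2 := by rw [hR]; push_cast; omega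
      have hq : (i : Int) / 3 = R := by rw [hR]; omega
      have hs : sVal n (R + 1) = sVal n R + 3 * n - 3 - 9 * R := sVal_succ n R
      have hs' : sVal n ((i : Int) / 3 + 1) = sVal n R + 3 * n - 3 - 9 * R := by rw [hq]; exact hs
      norm_num [Prod.mk.injEq]
      exact ⟨by linarith, by linarith, by linarith⟩

theorem fd2 (a : Int) : PySem.Int.floordiv a 2 = a / 2 :=
  PySem.Int.floordiv_eq_ediv_of_pos (by norm_num)

theorem cell_left (n r t : Int) (h0 : 0 ≤ r) (h1 : 0 ≤ t) (h2 : t ≤ n - 3 * r - 1) :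
    cell n (2 * r + t) r = sVal n r + t + 1 := by
  simp only [cell, fd2, sVal]
  rw [show min r (min (n - 1 - (2 * r + t)) (2 * r + t - r)) = r from by omega]
  rw [if_pos (show r - r = 0 from by omega)]
  linarith

theorem cell_bottom (n r t : Int) (h0 : 0 ≤ r) (h1 : 0 ≤ t) (h2 : t ≤ n - 3 * r - 2) :
    cell n (n - 1 - r) (r + 1 + t) = sVal n r + (n - 3 * r) + 1 + t := by
  simp only [cell, fd2, sVal]
  rw [show min (r + 1 + t) (min (n - 1 - (n - 1 - r)) (n - 1 - r - (r + 1 + t))) = r from by omega]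
  rw [if_neg (show ¬(r + 1 + t - r = 0) from by omega)]
  rw [if_pos (show n - 1 - r - 2 * r = n - 3 * r - 1 from by omega)]
  linarith

theorem cell_diag (n r t : Int) (h0 : 0 ≤ r) (h1 : 0 ≤ t) (h2 : t ≤ n - 3 * r - 3) :
    cell n (n - r - 2 - t) (n - 2 * r - 2 - t) = sVal n r + 2 * (n - 3 * r) + t := by
  simp only [cell, fd2, sVal]
  rw [show min (n - 2 * r - 2 - t) (min (n - 1 - (n - r - 2 - t)) (n - r - 2 - t - (n - 2 * r - 2 - t))) = r from by omega]
  rw [if_neg (show ¬(n - 2 * r - 2 - t - r = 0) from by omega)]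
  rw [if_neg (show ¬(n - r - 2 - t - 2 * r = n - 3 * r - 1) from by omega)]
  linarith

theorem cell_pos (n i j : Int) (h0 : 0 ≤ j) (h1 : j ≤ i) (h2 : i < n) : 1 ≤ cell n i j := by
  have hr0 : 0 ≤ min j (min (n - 1 - i) (i - j)) := by omega
  have hr1 : 3 * min j (min (n - 1 - i) (i - j)) ≤ n - 1 := by omega
  set r := min j (min (n - 1 - i) (i - j)) with hRdef
  obtain ⟨c, hc⟩ := even_pred_self r
  have hrr : 0 ≤ r * (r - 1) := by
    rcases le_or_gt 1 r with h | h
    · exact mul_nonneg (by omega) (by omega)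
    · have hz : r = 0 := by omega
      simp [hz]
  have hc0 : 0 ≤ c := by linarith
  have hmul : 0 ≤ 3 * r * (n - 3 * r - 1) := by
    have := mul_nonneg (by linarith : (0:Int) ≤ 3 * r) (by linarith : (0:Int) ≤ n - 3 * r - 1)
    linarith
  have hdiv : (9 * r * (r - 1)) / 2 = 9 * c := by
    rw [show 9 * r * (r - 1) = 2 * (9 * c) from by linear_combination 9 * hc]
    exact Int.mul_ediv_cancel_left _ (by norm_num)
  have hs : 0 ≤ 3 * r * n - 3 * r - (9 * r * (r - 1)) / 2 := by
    rw [hdiv]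
    nlinarith
  simp only [cell, fd2]
  rw [← hRdef]
  split_ifs <;> omega

theorem stA_prefix (n : Int) (i k : Nat) (h : i ≤ k) : (stA n i).1 <+: (stA n k).1 := by
  induction k with
  | zero => simp [Nat.le_zero.mp h]
  | succ k ih =>
    rcases Nat.lt_or_ge i (k + 1) with hlt | hge
    · exact (ih (by omega)).trans ⟨runWrites (stA n k).2.2.1 (stA n k).2.2.2 (dirA k).1 (dirA k).2 (stA n k).2.1 ((n - (k : Int)).toNat), rfl⟩
    · have : i = k + 1 := by omega
      subst this; exact List.prefix_refl _

theorem ws_spec (n : Int) (i : Nat) (hi : (i : Int) ≤ n) :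
    ∀ w ∈ (stA n i).1,
      (0 ≤ w.1.2 ∧ w.1.2 ≤ w.1.1 ∧ w.1.1 < n) ∧ w.2 = cell n w.1.1 w.1.2 := by
  induction i with
  | zero => simp [stA]
  | succ i ih =>
    have hi' : (i : Int) ≤ n := by push_cast at hi ⊢; omega
    intro w hw
    simp only [stA, List.mem_append] at hw
    rcases hw with hw | hw
    · exact ih hi' w hw
    · have hst := lap_inv n i hi'
      rw [mem_runWrites] at hw
      obtain ⟨t, ht, rfl⟩ := hw
      have hkt : ((t : Int)) < n - i := by omega
      have h3 : i % 3 = 0 ∨ i % 3 = 1 ∨ i % 3 = 2 := by omega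
      rcases h3 with h | h | h
      · have hd : dirA i = (1, 0) := by rw [dirA_eq, h]; rfl
        rw [hst, hd]
        simp only [expSt, h]
        set R := ((i / 3 : Nat) : Int) with hR
        norm_num
        have hie : (i : Int) = 3 * R := by rw [hR]; push_cast; omega
        have hc := cell_left n R t (by rw [hR]; positivity) (by positivity) (by omega)
        exact ⟨⟨by positivity, by omega, by omega⟩, by rw [hc]; omega⟩
      · have hd : dirA i = (0, 1) := by rw [dirA_eq, h]; rfl
        rw [hst, hd]
        simp only [expSt, h]
        set R := ((i / 3 : Nat) : Int) with hR
        norm_num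
        have hie : (i : Int) = 3 * R + 1 := by rw [hR]; push_cast; omega
        have hc := cell_bottom n R t (by rw [hR]; positivity) (by positivity) (by omega)
        rw [show R + ((t : Int) + 1) = R + 1 + t from by ring]
        exact ⟨⟨by positivity, by omega, by omega⟩, by rw [hc]; omega⟩
      · have hd : dirA i = (-1, -1) := by rw [dirA_eq, h]; rfl
        rw [hst, hd]
        simp only [expSt, h]
        set R := ((i / 3 : Nat) : Int) with hR
        norm_num
        have hie : (i : Int) = 3 * R + 2 := by rw [hR]; push_cast; omega
        have hc := cell_diag n R t (by rw [hR]; positivity) (by positivity) (by omega)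
        rw [show n - 1 - R + (-1 + -(t : Int)) = n - R - 2 - t from by ring,
          show n - 2 * R - 1 + (-1 + -(t : Int)) = n - 2 * R - 2 - t from by ring]
        exact ⟨⟨by omega, by omega, by omega⟩, by rw [hc]; omega⟩

theorem mem_of_run (n : Int) (i0 : Nat) (hi0 : (i0 : Int) < n) (w : (Int × Int) × Int)
    (hw : w ∈ runWrites (stA n i0).2.2.1 (stA n i0).2.2.2 (dirA i0).1 (dirA i0).2 (stA n i0).2.1
      ((n - (i0 : Int)).toNat)) :
    w ∈ (stA n n.toNat).1 := by
  have h1 : w ∈ (stA n (i0 + 1)).1 := by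
    simp only [stA, List.mem_append]
    exact Or.inr hw
  exact (stA_prefix n (i0 + 1) n.toNat (by omega)).subset h1

theorem ws_cover (n : Int) (i j : Int) (h0 : 0 ≤ j) (h1 : j ≤ i) (h2 : i < n) :
    (i, j) ∈ (stA n n.toNat).1.map (·.1) := by
  have hr0 : 0 ≤ min j (min (n - 1 - i) (i - j)) := by omega
  have h3r : 3 * min j (min (n - 1 - i) (i - j)) ≤ n - 1 := by omega
  set r := min j (min (n - 1 - i) (i - j)) with hrdef
  set R : Nat := r.toNat with hRdef
  have hRr : (R : Int) = r := Int.toNat_of_nonneg hr0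
  by_cases hj : j = r
  · -- left edge: written by run 3R
    have hi0 : ((3 * R : Nat) : Int) < n := by push_cast; omega
    have hst := lap_inv n (3 * R) (le_of_lt hi0)
    have hd : dirA (3 * R) = (1, 0) := by
      rw [dirA_eq]; simp [Nat.mul_mod_right]
    have hq : (3 * R) % 3 = 0 := by omega
    have hq2 : (3 * R) / 3 = R := by omega
    refine List.mem_map.mpr ⟨_, mem_of_run n (3 * R) hi0 _ (mem_runWrites.mpr
      ⟨(i - 2 * r).toNat, ?_, rfl⟩), ?_⟩
    · omega
    · rw [hst, hd]
      simp only [expSt, hq, hq2, if_pos]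
      norm_num
      have hcast : ((i - 2 * r).toNat : Int) = i - 2 * r := Int.toNat_of_nonneg (by omega)
      constructor <;> omega
  · by_cases hi : i = n - 1 - r
    · -- bottom edge: written by run 3R+1
      have hi0 : ((3 * R + 1 : Nat) : Int) < n := by push_cast; omega
      have hst := lap_inv n (3 * R + 1) (le_of_lt hi0)
      have hd : dirA (3 * R + 1) = (0, 1) := by
        rw [dirA_eq]; simp [Nat.mul_add_mod]
      have hq : (3 * R + 1) % 3 = 1 := by omega
      have hq2 : (3 * R + 1) / 3 = R := by omega
      refine List.mem_map.mpr ⟨_, mem_of_run n (3 * R + 1) hi0 _ (mem_runWrites.mpr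
        ⟨(j - r - 1).toNat, ?_, rfl⟩), ?_⟩
      · omega
      · rw [hst, hd]
        simp only [expSt, hq, hq2]
        norm_num
        have hcast : ((j - r - 1).toNat : Int) = j - r - 1 := Int.toNat_of_nonneg (by omega)
        constructor <;> omega
    · -- diagonal edge: written by run 3R+2
      have hdg : i - j = r := by omega
      have hi0 : ((3 * R + 2 : Nat) : Int) < n := by push_cast; omega
      have hst := lap_inv n (3 * R + 2) (le_of_lt hi0)
      have hd : dirA (3 * R + 2) = (-1, -1) := by
        rw [dirA_eq]; simp [Nat.mul_add_mod]
      have hq : (3 * R + 2) % 3 = 2 := by omega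
      have hq2 : (3 * R + 2) / 3 = R := by omega
      refine List.mem_map.mpr ⟨_, mem_of_run n (3 * R + 2) hi0 _ (mem_runWrites.mpr
        ⟨(n - 2 * r - 2 - j).toNat, ?_, rfl⟩), ?_⟩
      · omega
      · rw [hst, hd]
        simp only [expSt, hq, hq2]
        norm_num
        have hcast : ((n - 2 * r - 2 - j).toNat : Int) = n - 2 * r - 2 - j := Int.toNat_of_nonneg (by omega)
        constructor <;> omega

def goodGrid (n : Int) (g : List (List Int)) : Prop :=
  g.length = n.toNat ∧ ∀ row ∈ g, row.length = n.toNat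

theorem pyGetD_pySetD_int {α : Type} (xs : List α) (k i : Int) (v d : α)
    (hk0 : 0 ≤ k) (hk1 : k < xs.length) (hi0 : 0 ≤ i) (hi1 : i < xs.length) :
    PySem.List.pyGetD (PySem.List.pySetD xs k v) i d = if i = k then v else PySem.List.pyGetD xs i d := by
  have hk : k = ((k.toNat : Nat) : Int) := (Int.toNat_of_nonneg hk0).symm
  have hi : i = ((i.toNat : Nat) : Int) := (Int.toNat_of_nonneg hi0).symm
  rw [hk, hi, PySem.List.pyGetD_pySetD_natCast xs k.toNat i.toNat v d (by omega)]
  by_cases h : i.toNat = k.toNat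
  · rw [if_pos h, if_pos (by omega)]
  · rw [if_neg h, if_neg (by omega)]

theorem writeCell_shape {n : Int} {g : List (List Int)} (h : goodGrid n g) (p : Int × Int) (v : Int)
    (hp : 0 ≤ p.1 ∧ (p.1 : Int) < n) : goodGrid n (writeCell g p v) := by
  obtain ⟨hlen, hrow⟩ := h
  have hp1 : p.1 < (g.length : Int) := by omega
  constructor
  · rw [writeCell, PySem.List.pySetD_of_nonneg _ _ hp.1, List.length_set]; exact hlen
  · intro row hr
    rw [writeCell, PySem.List.pySetD_of_nonneg _ _ hp.1] at hr
    rcases List.mem_or_eq_of_mem_set hr with hr | hr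
    · exact hrow _ hr
    · subst hr
      rw [PySem.List.length_pySetD]
      exact hrow _ (PySem.List.pyGetD_mem _ _ (by simp [PySem.Raise.InRange]; omega))

theorem writeCell_get {n : Int} {g : List (List Int)} (h : goodGrid n g) (p : Int × Int) (v : Int)
    (hp : 0 ≤ p.1 ∧ p.1 < n ∧ 0 ≤ p.2 ∧ p.2 < n) (i j : Int)
    (hi : 0 ≤ i ∧ i < n) (hj : 0 ≤ j ∧ j < n) :
    PySem.List.pyGetD (PySem.List.pyGetD (writeCell g p v) i []) j 0
      = if (i, j) = p then v else PySem.List.pyGetD (PySem.List.pyGetD g i []) j 0 := by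
  obtain ⟨hlen, hrow⟩ := h
  rw [writeCell, pyGetD_pySetD_int g p.1 i _ _ hp.1 (by omega) hi.1 (by omega)]
  by_cases hip : i = p.1
  · rw [if_pos hip]
    have hrl : (PySem.List.pyGetD g p.1 ([] : List Int)).length = n.toNat :=
      hrow _ (PySem.List.pyGetD_mem _ _ (by simp [PySem.Raise.InRange]; omega))
    rw [pyGetD_pySetD_int _ p.2 j _ _ hp.2.2.1 (by omega) hj.1 (by omega)]
    by_cases hjp : j = p.2
    · rw [if_pos hjp, if_pos (by rw [hip, hjp])]
    · rw [if_neg hjp, if_neg (by simp [Prod.ext_iff]; intro _; exact hjp), hip]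
  · rw [if_neg hip, if_neg (by simp [Prod.ext_iff]; intro h'; exact absurd h' hip)]

theorem applyWrites_get {n : Int} {g : List (List Int)} (h : goodGrid n g)
    (f : Int × Int → Int) (ws : List ((Int × Int) × Int))
    (hws : ∀ w ∈ ws, (0 ≤ w.1.1 ∧ w.1.1 < n ∧ 0 ≤ w.1.2 ∧ w.1.2 < n) ∧ w.2 = f w.1)
    (i j : Int) (hi : 0 ≤ i ∧ i < n) (hj : 0 ≤ j ∧ j < n) :
    PySem.List.pyGetD (PySem.List.pyGetD (applyWrites g ws) i []) j 0
      = if (i, j) ∈ ws.map (·.1) then f (i, j)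
        else PySem.List.pyGetD (PySem.List.pyGetD g i []) j 0 := by
  induction ws generalizing g with
  | nil => simp [applyWrites]
  | cons w ws ih =>
    have hw := hws w List.mem_cons_self
    have hsh := writeCell_shape h w.1 w.2 ⟨hw.1.1, hw.1.2.1⟩
    have hrec := ih hsh (fun w' hw' => hws w' (List.mem_cons_of_mem _ hw')) 
    show PySem.List.pyGetD (PySem.List.pyGetD (applyWrites (writeCell g w.1 w.2) ws) i []) j 0 = _
    rw [hrec]
    rw [writeCell_get h w.1 w.2 hw.1 i j hi hj]
    simp only [List.map_cons, List.mem_cons]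
    by_cases hmem : (i, j) ∈ ws.map (·.1)
    · rw [if_pos hmem, if_pos (Or.inr hmem)]
    · rw [if_neg hmem]
      by_cases he : (i, j) = w.1
      · rw [if_pos (Or.inl he), if_pos he, hw.2, he]
      · rw [if_neg he, if_neg (by rintro (h' | h'); exact he h'; exact hmem h')]

theorem arr0_shape (n : Int) : goodGrid n (arr0 n) := by
  constructor
  · rw [arr0, List.length_map, PySem.List.length_pyRange_one]; omega
  · intro row hr
    rw [arr0, List.mem_map] at hr
    obtain ⟨_, _, rfl⟩ := hr
    rw [PySem.List.pyRepeat_singleton, List.length_replicate]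

theorem arr0_get (n i j : Int) : PySem.List.pyGetD (PySem.List.pyGetD (arr0 n) i []) j 0 = 0 := by
  by_cases h : PySem.Raise.InRange (arr0 n).length i
  · have hm := PySem.List.pyGetD_mem (arr0 n) ([] : List Int) h
    rw [arr0, List.mem_map] at hm
    obtain ⟨_, _, he⟩ := hm
    rw [show PySem.List.pyGetD (arr0 n) i [] = PySem.List.pyRepeat [(0 : Int)] n from by rw [arr0]; exact he.symm]
    rw [PySem.List.pyRepeat_singleton]
    by_cases h2 : PySem.Raise.InRange (List.replicate n.toNat (0 : Int)).length j
    · exact List.eq_of_mem_replicate (PySem.List.pyGetD_mem (List.replicate n.toNat (0 : Int)) (0 : Int) h2)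
    · exact PySem.List.pyGetD_of_none _ _ _ ((PySem.List.pyGet?_eq_none_iff _ _).mpr h2)
  · rw [PySem.List.pyGetD_of_none _ _ _ ((PySem.List.pyGet?_eq_none_iff _ _).mpr h)]
    simp [PySem.List.pyGetD, PySem.List.pyGet?]

theorem grid_val (n : Int) (hn : 0 < n) (i j : Int) (hi : 0 ≤ i ∧ i < n) (hj : 0 ≤ j ∧ j < n) :
    PySem.List.pyGetD (PySem.List.pyGetD (applyWrites (arr0 n) (stA n n.toNat).1) i []) j 0
      = if j ≤ i then cell n i j else 0 := by
  have hN : ((n.toNat : Nat) : Int) = n := Int.toNat_of_nonneg (by omega)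
  have hws := ws_spec n n.toNat (by omega)
  have hws' : ∀ w ∈ (stA n n.toNat).1,
      (0 ≤ w.1.1 ∧ w.1.1 < n ∧ 0 ≤ w.1.2 ∧ w.1.2 < n) ∧ w.2 = (fun p : Int × Int => cell n p.1 p.2) w.1 := by
    intro w hw
    obtain ⟨⟨a, b, c⟩, d⟩ := hws w hw
    exact ⟨⟨by omega, by omega, by omega, by omega⟩, d⟩
  rw [applyWrites_get (arr0_shape n) (fun p : Int × Int => cell n p.1 p.2) _ hws' i j hi hj, arr0_get]
  by_cases hle : j ≤ i
  · rw [if_pos (ws_cover n i j hj.1 hle hi.2), if_pos hle]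
  · rw [if_neg ?_, if_neg hle]
    intro hmem
    rw [List.mem_map] at hmem
    obtain ⟨w, hw, he⟩ := hmem
    obtain ⟨⟨a, b, c⟩, _⟩ := hws w hw
    rw [he] at b
    exact hle b

theorem alt_flat (n : Int) :
    solution_alt n = (PySem.List.pyRange 0 n).flatMap (fun i => (PySem.List.pyRange 0 (i + 1)).map (cell n i)) := by
  rw [solution_alt]
  rw [show (fun (acc : List Int) i => (PySem.List.pyRange 0 (i + 1)).foldl (fun acc j => acc ++ [cell n i j]) acc)
      = (fun acc i => acc ++ (PySem.List.pyRange 0 (i + 1)).map (cell n i)) from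
    funext fun acc => funext fun i => PySem.List.foldl_append_singleton_eq_map _ _ _]
  rw [PySem.List.foldl_append_eq_flatMap]
  simp

theorem sol_eq (n : Int) : solution n = solution_alt n := by
  rcases le_or_gt n 0 with hn | hn
  · have hnil : PySem.List.pyRange 0 n = [] := PySem.List.pyRange_one_eq_nil hn
    simp only [solution, solution_alt, hnil, List.foldl_nil]
  · have hN : ((n.toNat : Nat) : Int) = n := Int.toNat_of_nonneg (by omega)
    have hrange : PySem.List.pyRange 0 n = PySem.List.pyRange 0 ((n.toNat : Nat) : Int) := by rw [hN]
    simp only [solution]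
    rw [hrange]
    rw [show (PySem.List.pyRange 0 ((n.toNat : Nat) : Int)).map (fun _ => PySem.List.pyRepeat [(0 : Int)] n) = arr0 n from by rw [arr0, hN]]
    rw [outer_fold n n.toNat (by omega)]
    dsimp only
    have hval : ∀ i j : Int, 0 ≤ i → i < n → 0 ≤ j → j < n →
        PySem.List.pyGetD (PySem.List.pyGetD (applyWrites (arr0 n) (stA n n.toNat).1) i []) j 0
          = if j ≤ i then cell n i j else 0 := fun i j a b c d => grid_val n hn i j ⟨a, b⟩ ⟨c, d⟩
    rw [PySem.List.foldl_congr_mem' _ _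
      (fun (acc : List Int) i => acc ++ (PySem.List.pyRange 0 (i + 1)).map (cell n i)) _ ?_]
    · rw [PySem.List.foldl_append_eq_flatMap, alt_flat, hrange]
      simp
    · intro i hi acc
      have hib := PySem.List.mem_pyRange_one.mp hi
      have hib' : 0 ≤ i ∧ i < n := by omega
      rw [PySem.List.foldl_append_ite
        (p := fun j => PySem.List.pyGetD (PySem.List.pyGetD (applyWrites (arr0 n) (stA n n.toNat).1) i []) j 0 ≠ 0)
        (f := fun j => PySem.List.pyGetD (PySem.List.pyGetD (applyWrites (arr0 n) (stA n n.toNat).1) i []) j 0)]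
      congr 1
      have hfil : List.filter (fun j => decide (PySem.List.pyGetD (PySem.List.pyGetD (applyWrites (arr0 n) (stA n n.toNat).1) i []) j 0 ≠ 0)) (PySem.List.pyRange 0 ((n.toNat : Nat) : Int))
          = PySem.List.pyRange 0 (i + 1) := by
        rw [List.filter_congr (q := fun j => decide (j ≤ i)) ?_]
        · rw [PySem.List.pyRange_one_append 0 (i + 1) ((n.toNat : Nat) : Int) (by omega) (by omega),
            List.filter_append,
            List.filter_eq_self.mpr (fun j hj => by
              have := PySem.List.mem_pyRange_one.mp hj
              simp only [decide_eq_true_eq]; omega),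
            List.filter_eq_nil_iff.mpr (fun j hj => by
              have := PySem.List.mem_pyRange_one.mp hj
              simp only [decide_eq_true_eq]; omega),
            List.append_nil]
        · intro j hj
          have hjb := PySem.List.mem_pyRange_one.mp hj
          have hv := hval i j hib'.1 hib'.2 (by omega) (by omega)
          by_cases hle : j ≤ i
          · have hpos := cell_pos n i j (by omega) hle hib'.2
            simp only [hv, if_pos hle]
            simp [hle]
            omega
          · simp only [hv, if_neg hle, decide_eq_true_eq, hle]
            simp
      rw [hfil]
      refine List.map_congr_left fun j hj => ?_
      have hjb := PySem.List.mem_pyRange_one.mp hj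
      have hv := hval i j hib'.1 hib'.2 (by omega) (by omega)
      rw [hv, if_pos (by omega)]

-- ===== VERDICT (by name: the statement is the Claim_ definition above) =====
theorem solution_spec : Claim_equal_solution := by
  intro n _
  unfold Spec_solution
  exact sol_eq n
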